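-- pv_equiv track=rewrite | github.com/Xiao-Li-1011/some-assignment | COMP9021-Ass1/superpower.py | hero_once
-- ===== SOURCE A (Python) =====
-- def hero_once(input_number, nb_of_swiches):
--     '''
--     sort the input list, then switch the elements in the list from the
--     least one
--     >>> hero_once([-7,1,2,3,4], 5)
--     -3
--     >>> hero_once([4,-3,1,2,-7], 3)
--     15
--     >>> hero_once([1,2,3,4,5], 2)
--     9
--     '''
--     output_number = [i for i in input_number]
--     output_number.sort()
--     for i in range(0, len(output_number)):
--         output_number[i] = output_number[i] - output_number[i] * 2
--         nb_of_swiches -= 1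
--         if nb_of_swiches == 0:
--             return sum(output_number)
--             break
-- ===== SOURCE B (Python) =====
-- def hero_once(input_number, nb_of_swiches):
--     # Closed form: negating the k smallest elements changes the total by
--     # -2 * (sum of the k smallest), so the answer is total - 2 * sum(sorted[:k]).
--     # Like A, yields no number (None) unless 1 <= k <= len(input_number).
--     if 1 <= nb_of_swiches <= len(input_number):
--         return sum(input_number) - 2 * sum(sorted(input_number)[:nb_of_swiches])
-- ===== Notes on version B (the rewrite author's own statement) =====
-- stated objective: simpler
-- what changed: A mutates a sorted copy element by element inside a counter loop and sums the whole list when the counter hits zero; B computes the closed form total minus twice the sum of the k smallest elements (a sorted-prefix sum), with no mutation loop.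
-- outside the precondition, e.g. on hero_once([1, 2], 3): A returns None, B returns None; on hero_once([], 1): A returns None, B returns None
import Mathlib
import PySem

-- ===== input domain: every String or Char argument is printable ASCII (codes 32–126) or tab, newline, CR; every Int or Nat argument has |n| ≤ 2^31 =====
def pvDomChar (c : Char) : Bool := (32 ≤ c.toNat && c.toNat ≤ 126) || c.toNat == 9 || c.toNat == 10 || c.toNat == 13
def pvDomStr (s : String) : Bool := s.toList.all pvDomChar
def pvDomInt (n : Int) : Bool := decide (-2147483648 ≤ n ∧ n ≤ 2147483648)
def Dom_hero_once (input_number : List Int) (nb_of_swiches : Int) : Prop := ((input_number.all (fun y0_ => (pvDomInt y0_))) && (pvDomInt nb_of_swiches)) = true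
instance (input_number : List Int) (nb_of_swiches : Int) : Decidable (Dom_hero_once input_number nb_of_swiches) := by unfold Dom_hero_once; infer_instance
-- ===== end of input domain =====

-- B replaces A's mutate-and-count loop by the closed form total − 2·(sum of the k smallest); objective: simpler.

-- ===== PORT A =====
-- A's for-loop over range(0, len): negate output_number[i] in place, decrement the
-- counter, return sum(output_number) when it reaches 0.  If the loop ends without the
-- counter hitting 0, Python A returns None (no Int); that path is outside Pre_ and the
-- port returns 0 there.
def heroLoopA (xs : List Int) (nb : Int) (i : Nat) : Int :=
  if h : i < xs.length then
    let xs' := xs.set i (xs[i] - xs[i] * 2)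
    let nb' := nb - 1
    if nb' = 0 then xs'.sum
    else heroLoopA xs' nb' (i + 1)
  else 0
termination_by xs.length - i
decreasing_by simp; omega

def hero_once (input_number : List Int) (nb_of_swiches : Int) : Int :=
  let output_number := input_number.map (fun i => i)
  let output_number := PySem.List.sorted output_number (fun x => x) false
  heroLoopA output_number nb_of_swiches 0

-- ===== PORT B =====
-- B returns None (no Int) unless 1 ≤ k ≤ len, like A; that branch is outside Pre_
-- and the port returns 0 there.
def hero_once_alt (input_number : List Int) (nb_of_swiches : Int) : Int :=
  if 1 ≤ nb_of_swiches ∧ nb_of_swiches ≤ input_number.length then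
    input_number.sum -
      2 * (PySem.List.slice (PySem.List.sorted input_number (fun x => x) false)
             none (some nb_of_swiches)).sum
  else 0

-- ===== PRECONDITION & SPEC =====
-- Pre_ excludes exactly the inputs on which Python A falls off the loop (or never
-- enters it) and returns None, which is not an Int: those with nb_of_swiches < 1 or
-- nb_of_swiches > len(input_number).
def Pre_hero_once (input_number : List Int) (nb_of_swiches : Int) : Prop :=
  1 ≤ nb_of_swiches ∧ nb_of_swiches ≤ input_number.length
instance (input_number : List Int) (nb_of_swiches : Int) : Decidable (Pre_hero_once input_number nb_of_swiches) := by unfold Pre_hero_once; infer_instance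

def pvWitness_hero_once : List Int × Int := ([4, -3, 1, 2, -7], 3)

def Spec_hero_once (input_number : List Int) (nb_of_swiches : Int) (out : Int) : Prop := out = hero_once_alt input_number nb_of_swiches
instance (input_number : List Int) (nb_of_swiches : Int) (out : Int) : Decidable (Spec_hero_once input_number nb_of_swiches out) := by unfold Spec_hero_once; infer_instance

-- ===== CLAIM (what is proved, stated in full; the proofs are below) =====
def Claim_equal_hero_once : Prop := ∀ (input_number : List Int) (nb_of_swiches : Int), Dom_hero_once input_number nb_of_swiches → Pre_hero_once input_number nb_of_swiches → Spec_hero_once input_number nb_of_swiches (hero_once input_number nb_of_swiches)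

-- ===== LEMMAS AND PROOFS =====

-- A's loop starting at index i with counter nb (1 ≤ nb, i + nb ≤ len) negates the
-- nb elements xs[i..i+nb) and returns the sum: total − 2·sum of that segment.
theorem heroLoopA_closed (xs : List Int) (i : Nat) (nb : Int)
    (h1 : 1 ≤ nb) (h2 : i + nb.toNat ≤ xs.length) :
    heroLoopA xs nb i = xs.sum - 2 * ((xs.drop i).take nb.toNat).sum := by
  have hlt : i < xs.length := by omega
  have hd : xs.drop i = xs[i] :: xs.drop (i + 1) := List.drop_eq_getElem_cons hlt
  have hsumset : (xs.set i (xs[i] - xs[i] * 2)).sum = xs.sum - 2 * xs[i] := by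
    rw [List.sum_set']
    rw [dif_pos hlt]
    ring
  rw [heroLoopA]
  simp only [dif_pos hlt]
  by_cases hnb : nb - 1 = 0
  · have hone : nb = 1 := by omega
    subst hone
    rw [if_pos hnb, hsumset]
    have ht : (List.take (Int.toNat 1) (List.drop i xs)).sum = xs[i] := by
      rw [hd, show Int.toNat 1 = 0 + 1 from rfl, List.take_succ_cons, List.take_zero,
          List.sum_cons, List.sum_nil, add_zero]
      rfl
    rw [ht]
    rfl
  · rw [if_neg hnb]
    have hrec := heroLoopA_closed (xs.set i (xs[i] - xs[i] * 2)) (i + 1) (nb - 1)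
      (by omega) (by simp only [List.length_set]; omega)
    rw [hrec, hsumset]
    have hdropset : (xs.set i (xs[i] - xs[i] * 2)).drop (i + 1) = xs.drop (i + 1) := by
      apply List.ext_getElem
      · simp
      · intro j hj hj'
        simp only [List.getElem_drop, List.getElem_set]
        have hne : i ≠ i + 1 + j := by omega
        simp [hne]
    rw [hdropset, hd]
    have hnbnat : nb.toNat = (nb - 1).toNat + 1 := by omega
    rw [hnbnat, List.take_succ_cons]
    simp only [List.sum_cons]
    ring
termination_by nb.toNat
decreasing_by omega

-- ===== VERDICT (by name: the statement is the Claim_ definition above) =====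
theorem hero_once_spec : Claim_equal_hero_once := by
  intro xs k _ hpre
  obtain ⟨h1, h2⟩ := hpre
  unfold Spec_hero_once hero_once hero_once_alt
  rw [if_pos ⟨h1, h2⟩]
  have hmapid : xs.map (fun i => i) = xs := List.map_id' xs
  simp only [hmapid]
  have hlen : (PySem.List.sorted xs (fun x => x) false).length = xs.length :=
    PySem.List.length_sorted xs (fun x => x) false
  have hsum : (PySem.List.sorted xs (fun x => x) false).sum = xs.sum :=
    (PySem.List.sorted_perm xs (fun x => x) false).sum_eq
  rw [heroLoopA_closed _ 0 k h1 (by omega), hsum,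
      PySem.List.slice_to]
  · simp
  · omega
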